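-- pv_equiv track=rewrite | github.com/Aleazer1997/receipt-processor | backend/ocr.py | extract_merchant_name
-- ===== SOURCE A (Python) =====
-- def extract_merchant_name(text: str) -> str:
--     # Clean and split into lines
--     lines = [line.strip() for line in text.splitlines() if line.strip()]
--     candidate_lines = lines[:10]  # Only consider top 10 lines
--
--     # Keywords that likely mean it's not the merchant
--     skip_keywords = ['DATE', 'INVOICE', 'TOTAL', 'CHARGE', 'FEE', 'BALANCE', 'AMOUNT']
--
--     for line in candidate_lines:
--         # Must not contain skip keywords
--         if any(skip_word in line.upper() for skip_word in skip_keywords):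
--             continue
--
--         # Prefer uppercase or title-cased lines that are short
--         if line.isupper() or line.istitle():
--             if 3 < len(line) < 40:
--                 return line.replace('*', '').strip()
--
--     # Fallback: take first non-skipped line
--     for line in candidate_lines:
--         if any(skip_word in line.upper() for skip_word in skip_keywords):
--             continue
--         return line.strip()
--
--     return "Unknown"
-- ===== SOURCE B (Python) =====
-- def extract_merchant_name(text: str) -> str:
--     skip_keywords = ['DATE', 'INVOICE', 'TOTAL', 'CHARGE', 'FEE', 'BALANCE', 'AMOUNT']
--     fallback = None
--     for line in [l.strip() for l in text.splitlines() if l.strip()][:10]: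
--         if any(k in line.upper() for k in skip_keywords):
--             continue
--         if fallback is None:
--             fallback = line
--         if (line.isupper() or line.istitle()) and 3 < len(line) < 40:
--             return line.replace('*', '').strip()
--     return fallback.strip() if fallback is not None else "Unknown"
-- ===== Notes on version B (the rewrite author's own statement) =====
-- stated objective: simpler
-- what changed: Replaces A's two sequential scans of the candidate lines by a single pass that records the first non-skipped line as a fallback and returns the first preferred line immediately.
import Mathlib
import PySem

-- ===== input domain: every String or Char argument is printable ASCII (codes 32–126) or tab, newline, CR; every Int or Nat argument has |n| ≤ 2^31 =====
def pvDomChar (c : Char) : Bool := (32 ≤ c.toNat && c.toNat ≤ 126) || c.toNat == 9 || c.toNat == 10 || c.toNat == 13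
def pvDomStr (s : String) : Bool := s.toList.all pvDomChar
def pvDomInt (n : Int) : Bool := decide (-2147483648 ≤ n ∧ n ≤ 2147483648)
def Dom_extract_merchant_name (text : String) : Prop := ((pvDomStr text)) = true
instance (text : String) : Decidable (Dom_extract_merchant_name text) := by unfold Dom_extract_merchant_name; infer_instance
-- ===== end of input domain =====

-- B replaces A's two scans over the candidate lines by one pass that records the first
-- non-skipped line as a fallback and returns the first preferred line immediately (objective: simpler).


-- ===== PORT A =====
-- shared primitives (ports of Python built-ins A and B both call; exact on the ASCII domain)
def pvSkipKeywords : List (List Char) :=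
  ["DATE".toList, "INVOICE".toList, "TOTAL".toList, "CHARGE".toList, "FEE".toList, "BALANCE".toList, "AMOUNT".toList]

-- any(skip_word in line.upper() for skip_word in skip_keywords)
def pvSkip (line : List Char) : Bool :=
  pvSkipKeywords.any (fun kw => PySem.Chars.isIn kw (PySem.Chars.upper line))

-- str.isupper(): at least one cased character and no lowercase one (cased = alphabetic on ASCII; exact there)
def pvIsupper (s : List Char) : Bool :=
  s.any (fun c => PySem.Chars.isalpha c) && s.all (fun c => !(PySem.Chars.islower c))

-- str.istitle(): uppercase only after uncased, lowercase only after cased, ≥ 1 cased (exact on ASCII);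
-- state = none (already failed) | some (previous char cased?, some cased char seen?)
def pvIstitle (s : List Char) : Bool :=
  (s.foldl (fun st c =>
      match st with
      | none => none
      | some (prevCased, seen) =>
        if PySem.Chars.isupper c then (if prevCased then none else some (true, true))
        else if PySem.Chars.islower c then (if prevCased then some (true, true) else none)
        else some (false, seen))
    (some (false, false))).elim false (·.2)

-- lines = [line.strip() for line in text.splitlines() if line.strip()]; candidate_lines = lines[:10]
def pvCandidates (text : String) : List (List Char) :=
  PySem.List.slice (((PySem.Chars.splitlines text.toList).map PySem.Chars.strip).filter (· ≠ [])) none (some 10)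

-- A's first loop: first non-skipped preferred line, returned as line.replace('*','').strip()
def pvALoop1 : List (List Char) → Option (List Char)
  | [] => none
  | l :: rest =>
    if pvSkip l then pvALoop1 rest
    else if pvIsupper l || pvIstitle l then
      if 3 < l.length && l.length < 40 then some (PySem.Chars.strip (PySem.Chars.replace l ['*'] []))
      else pvALoop1 rest
    else pvALoop1 rest

-- A's second loop: first non-skipped line stripped, else "Unknown"
def pvALoop2 : List (List Char) → List Char
  | [] => "Unknown".toList
  | l :: rest => if pvSkip l then pvALoop2 rest else PySem.Chars.strip l

def extract_merchant_name (text : String) : String :=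
  match pvALoop1 (pvCandidates text) with
  | some r => String.ofList r
  | none => String.ofList (pvALoop2 (pvCandidates text))

-- ===== PORT B =====
-- B's single pass with the fallback accumulator
def pvBLoop : List (List Char) → Option (List Char) → List Char
  | [], none => "Unknown".toList
  | [], some fb => PySem.Chars.strip fb
  | l :: rest, fb =>
    if pvSkip l then pvBLoop rest fb
    else
      let fb' := some (fb.getD l)   -- if fallback is None: fallback = line
      if (pvIsupper l || pvIstitle l) && (3 < l.length && l.length < 40)
      then PySem.Chars.strip (PySem.Chars.replace l ['*'] [])
      else pvBLoop rest fb'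

def extract_merchant_name_alt (text : String) : String :=
  String.ofList (pvBLoop (pvCandidates text) none)

-- ===== PRECONDITION & SPEC =====
def Spec_extract_merchant_name (text : String) (out : String) : Prop := out = extract_merchant_name_alt text
instance (text : String) (out : String) : Decidable (Spec_extract_merchant_name text out) := by unfold Spec_extract_merchant_name; infer_instance

-- ===== CLAIM (what is proved, stated in full; the proofs are below) =====
def Claim_equal_extract_merchant_name : Prop := ∀ (text : String), Dom_extract_merchant_name text → Spec_extract_merchant_name text (extract_merchant_name text)

-- ===== LEMMAS AND PROOFS =====
-- loop invariant: B's single pass equals A's first loop with A's second loop (resp. the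
-- already-recorded fallback, stripped) as the default
theorem pvBLoop_eq (cs : List (List Char)) :
    ∀ fb : Option (List Char),
      pvBLoop cs fb =
        (pvALoop1 cs).getD
          (match fb with | some f => PySem.Chars.strip f | none => pvALoop2 cs) := by
  induction cs with
  | nil => intro fb; cases fb <;> rfl
  | cons l rest ih =>
    intro fb
    by_cases hs : pvSkip l
    · cases fb <;> simp [pvBLoop, pvALoop1, pvALoop2, hs, ih]
    · by_cases hp : ((pvIsupper l || pvIstitle l) && (3 < l.length && l.length < 40)) = true
      · have h1 : (pvIsupper l || pvIstitle l) = true := by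
          cases h' : (pvIsupper l || pvIstitle l) <;> simp_all
        have h2 : (3 < l.length && l.length < 40) = true := by
          cases h' : (decide (3 < l.length) && decide (l.length < 40)) <;> simp_all
        cases fb <;> simp [pvBLoop, pvALoop1, hs, h1, h2]
      · have hB : pvBLoop (l :: rest) fb = pvBLoop rest (some (fb.getD l)) := by
          simp [pvBLoop, hs, hp]
        have hA : pvALoop1 (l :: rest) = pvALoop1 rest := by
          rcases h' : (pvIsupper l || pvIstitle l) with _ | _
          · simp [pvALoop1, hs, h']
          · have h2 : (3 < l.length && l.length < 40) = false := by
              cases h2' : (3 < l.length && l.length < 40) <;> simp_all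
            simp [pvALoop1, hs, h', h2]
        rw [hB, ih, hA]
        cases fb <;> simp [pvALoop2, hs]

-- ===== VERDICT (by name: the statement is the Claim_ definition above) =====
theorem extract_merchant_name_spec : Claim_equal_extract_merchant_name := by
  intro text _
  unfold Spec_extract_merchant_name extract_merchant_name extract_merchant_name_alt
  rw [pvBLoop_eq]
  cases h : pvALoop1 (pvCandidates text) <;> simp [Option.getD]
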